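-- pv_equiv track=rewrite | github.com/Abiaselli/tokenqualia | variabletokenencoding2.py | evaluate_derivatives
-- ===== SOURCE A (Python) =====
-- def encode_term(cx, ex, cy, ey):
--     return (cx << 12) | (ex << 8) | (cy << 4) | ey
--
-- def decode_term(encoded):
--     return ((encoded >> 12) & 0xF,
--             (encoded >> 8) & 0xF,
--             (encoded >> 4) & 0xF,
--              encoded & 0xF)
--
-- def differentiate_term(encoded):
--     cx, ex, cy, ey = decode_term(encoded)
--     dx_coeff = cx * ex
--     dx_exp   = max(ex - 1, 0)
--     dy_coeff = cy * ey
--     dy_exp   = max(ey - 1, 0)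
--     return encode_term(dx_coeff, dx_exp, 0, 0), encode_term(0, 0, dy_coeff, dy_exp)
--
-- def evaluate_term(encoded, x, y):
--     cx, ex, cy, ey = decode_term(encoded)
--     return (cx * (x ** ex)) + (cy * (y ** ey))
--
-- def evaluate_derivatives(terms, x_vals, y_vals):
--     total_dx, total_dy = [], []
--     for x, y in zip(x_vals, y_vals):
--         dx = sum(evaluate_term(differentiate_term(term)[0], x, y) for term in terms)
--         dy = sum(evaluate_term(differentiate_term(term)[1], x, y) for term in terms)
--         total_dx.append(dx)
--         total_dy.append(dy)
--     return total_dx, total_dy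
-- ===== SOURCE B (Python) =====
-- def encode_term(cx, ex, cy, ey):
--     return (cx << 12) | (ex << 8) | (cy << 4) | ey
--
-- def decode_term(encoded):
--     return ((encoded >> 12) & 0xF,
--             (encoded >> 8) & 0xF,
--             (encoded >> 4) & 0xF,
--              encoded & 0xF)
--
-- def differentiate_term(encoded):
--     cx, ex, cy, ey = decode_term(encoded)
--     return (encode_term(cx * ex, max(ex - 1, 0), 0, 0),
--             encode_term(0, 0, cy * ey, max(ey - 1, 0)))
--
-- def evaluate_term(encoded, x, y):
--     cx, ex, cy, ey = decode_term(encoded)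
--     return (cx * (x ** ex)) + (cy * (y ** ey))
--
-- def evaluate_derivatives(terms, x_vals, y_vals):
--     # Term-major: differentiate each term once, then sweep the points per
--     # derivative term, accumulating into per-point totals.
--     pts = list(zip(x_vals, y_vals))
--     derivs = [differentiate_term(t) for t in terms]
--     total_dx = [0] * len(pts)
--     total_dy = [0] * len(pts)
--     for dxt, dyt in derivs:
--         total_dx = [acc + evaluate_term(dxt, x, y) for acc, (x, y) in zip(total_dx, pts)]
--         total_dy = [acc + evaluate_term(dyt, x, y) for acc, (x, y) in zip(total_dy, pts)]
--     return total_dx, total_dy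
-- ===== Notes on version B (the rewrite author's own statement) =====
-- stated objective: faster
-- what changed: Loop nest inverted to term-major: derivatives are computed once per term into a table, then each derivative term is swept across the points, accumulating into zero-initialized per-point totals, instead of re-differentiating every term for every point.
import Mathlib
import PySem

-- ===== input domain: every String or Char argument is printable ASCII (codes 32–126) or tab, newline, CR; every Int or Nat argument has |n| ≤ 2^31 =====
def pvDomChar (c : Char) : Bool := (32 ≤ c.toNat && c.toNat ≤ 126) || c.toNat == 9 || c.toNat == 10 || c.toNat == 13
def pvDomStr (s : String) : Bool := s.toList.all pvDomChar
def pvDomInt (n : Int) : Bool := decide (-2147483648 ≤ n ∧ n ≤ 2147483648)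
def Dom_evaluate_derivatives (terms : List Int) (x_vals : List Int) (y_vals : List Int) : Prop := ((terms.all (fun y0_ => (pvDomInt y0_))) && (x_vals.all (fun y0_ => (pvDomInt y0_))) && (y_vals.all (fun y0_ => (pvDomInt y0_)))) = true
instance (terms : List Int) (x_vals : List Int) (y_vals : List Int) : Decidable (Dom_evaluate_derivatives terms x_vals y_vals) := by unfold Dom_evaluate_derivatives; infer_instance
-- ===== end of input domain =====

-- B changes only the traversal: derivatives are tabulated once per term and swept
-- term-major over per-point accumulators ("alternative": same asymptotics, fewer
-- differentiations); return values are proved equal.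

-- ===== PORT A =====
-- shared module-level helpers (identical source lines in Source A and Source B)
def encode_term (cx ex cy ey : Int) : Int :=
  PySem.Int.bor (PySem.Int.bor (PySem.Int.bor (cx <<< 12) (ex <<< 8)) (cy <<< 4)) ey

def decode_term (e : Int) : Int × Int × Int × Int :=
  (PySem.Int.band (e >>> 12) 15, PySem.Int.band (e >>> 8) 15,
   PySem.Int.band (e >>> 4) 15, PySem.Int.band e 15)

def differentiate_term (e : Int) : Int × Int :=
  let d := decode_term e
  (encode_term (d.1 * d.2.1) (max (d.2.1 - 1) 0) 0 0,
   encode_term 0 0 (d.2.2.1 * d.2.2.2) (max (d.2.2.2 - 1) 0))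

-- x ** ex is exact as x ^ ex.toNat: ex, ey come from `band _ 15`, hence 0 ≤ ex, ey
def evaluate_term (e x y : Int) : Int :=
  let d := decode_term e
  d.1 * x ^ (d.2.1).toNat + d.2.2.1 * y ^ (d.2.2.2).toNat

def evaluate_derivatives (terms : List Int) (x_vals : List Int) (y_vals : List Int) : List Int × List Int :=
  (x_vals.zip y_vals).foldl
    (fun acc xy =>
      let dx := terms.foldl (fun s t => s + evaluate_term (differentiate_term t).1 xy.1 xy.2) 0
      let dy := terms.foldl (fun s t => s + evaluate_term (differentiate_term t).2 xy.1 xy.2) 0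
      (acc.1 ++ [dx], acc.2 ++ [dy]))
    ([], [])

-- ===== PORT B =====
def evaluate_derivatives_alt (terms : List Int) (x_vals : List Int) (y_vals : List Int) : List Int × List Int :=
  let pts := x_vals.zip y_vals
  let derivs := terms.map differentiate_term
  derivs.foldl
    (fun acc d =>
      (List.zipWith (fun a xy => a + evaluate_term d.1 xy.1 xy.2) acc.1 pts,
       List.zipWith (fun a xy => a + evaluate_term d.2 xy.1 xy.2) acc.2 pts))
    (List.replicate pts.length (0 : Int), List.replicate pts.length (0 : Int))

-- ===== PRECONDITION & SPEC =====
def Spec_evaluate_derivatives (terms : List Int) (x_vals : List Int) (y_vals : List Int) (out : List Int × List Int) : Prop := out = evaluate_derivatives_alt terms x_vals y_vals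
instance (terms : List Int) (x_vals : List Int) (y_vals : List Int) (out : List Int × List Int) : Decidable (Spec_evaluate_derivatives terms x_vals y_vals out) := by unfold Spec_evaluate_derivatives; infer_instance

-- ===== CLAIM (what is proved, stated in full; the proofs are below) =====
def Claim_equal_evaluate_derivatives : Prop := ∀ (terms : List Int) (x_vals : List Int) (y_vals : List Int), Dom_evaluate_derivatives terms x_vals y_vals → Spec_evaluate_derivatives terms x_vals y_vals (evaluate_derivatives terms x_vals y_vals)

-- ===== LEMMAS AND PROOFS =====

-- A's point-major fold with append produces the two maps over the points.
theorem fold_append_char (f g : Int × Int → Int) :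
    ∀ (pts : List (Int × Int)) (a b : List Int),
      pts.foldl (fun acc xy => (acc.1 ++ [f xy], acc.2 ++ [g xy])) (a, b)
        = (a ++ pts.map f, b ++ pts.map g) := by
  intro pts
  induction pts with
  | nil => simp
  | cons p ps ih => intro a b; simp [List.foldl_cons, ih]

theorem zipWith_zipWith_same (f g : Int → Int × Int → Int) :
    ∀ (u : List Int) (p : List (Int × Int)),
      List.zipWith f (List.zipWith g u p) p
        = List.zipWith (fun a xy => f (g a xy) xy) u p := by
  intro u
  induction u with
  | nil => intro p; simp
  | cons x xs ih =>
    intro p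
    cases p with
    | nil => simp
    | cons q qs => simp [List.zipWith, ih]

theorem foldl_add_shift (f : Int × Int → Int) :
    ∀ (l : List (Int × Int)) (c : Int),
      l.foldl (fun s d => s + f d) c = c + l.foldl (fun s d => s + f d) 0 := by
  intro l
  induction l with
  | nil => simp
  | cons d ds ih =>
    intro c
    simp only [List.foldl_cons]
    rw [ih (c + f d), ih (0 + f d)]
    ring

theorem zipWith_replicate_map (f : Int → Int × Int → Int) (c : Int) :
    ∀ (pts : List (Int × Int)),
      List.zipWith f (List.replicate pts.length c) pts = pts.map (f c) := by
  intro pts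
  induction pts with
  | nil => simp
  | cons p ps ih => simp [List.replicate, ih]

-- zipWith (· + 0) is the identity when the lengths agree (B's zero-initialized accumulators)
theorem zipWith_add_zero :
    ∀ (u : List Int) (p : List (Int × Int)), u.length = p.length →
      List.zipWith (fun a (_ : Int × Int) => a + 0) u p = u := by
  intro u
  induction u with
  | nil => intro p _; simp
  | cons x xs ih =>
    intro p h
    cases p with
    | nil => simp at h
    | cons q qs => simp only [List.zipWith]; rw [ih qs (by simpa using h)]; simp

-- B's term-major fold adds, pointwise, the per-point sum over the derivative terms.
theorem B_fold (pts : List (Int × Int)) :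
    ∀ (derivs : List (Int × Int)) (u v : List Int),
      u.length = pts.length → v.length = pts.length →
      derivs.foldl
        (fun acc d =>
          (List.zipWith (fun a xy => a + evaluate_term d.1 xy.1 xy.2) acc.1 pts,
           List.zipWith (fun a xy => a + evaluate_term d.2 xy.1 xy.2) acc.2 pts))
        (u, v)
      = (List.zipWith (fun a xy => a + derivs.foldl (fun s d => s + evaluate_term d.1 xy.1 xy.2) 0) u pts,
         List.zipWith (fun a xy => a + derivs.foldl (fun s d => s + evaluate_term d.2 xy.1 xy.2) 0) v pts) := by
  intro derivs
  induction derivs with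
  | nil =>
    intro u v hu hv
    simp only [List.foldl_nil]
    rw [zipWith_add_zero u pts hu, zipWith_add_zero v pts hv]
  | cons d ds ih =>
    intro u v hu hv
    simp only [List.foldl_cons]
    rw [ih _ _ (by simp [List.length_zipWith, hu]) (by simp [List.length_zipWith, hv]),
        zipWith_zipWith_same, zipWith_zipWith_same]
    have h1 : (fun (a : Int) (xy : Int × Int) =>
        a + evaluate_term d.1 xy.1 xy.2
          + List.foldl (fun s d => s + evaluate_term d.1 xy.1 xy.2) 0 ds)
        = (fun (a : Int) (xy : Int × Int) =>
        a + List.foldl (fun s d => s + evaluate_term d.1 xy.1 xy.2) (0 + evaluate_term d.1 xy.1 xy.2) ds) := by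
      funext a xy
      rw [foldl_add_shift (fun d => evaluate_term d.1 xy.1 xy.2) ds (0 + evaluate_term d.1 xy.1 xy.2)]
      ring
    have h2 : (fun (a : Int) (xy : Int × Int) =>
        a + evaluate_term d.2 xy.1 xy.2
          + List.foldl (fun s d => s + evaluate_term d.2 xy.1 xy.2) 0 ds)
        = (fun (a : Int) (xy : Int × Int) =>
        a + List.foldl (fun s d => s + evaluate_term d.2 xy.1 xy.2) (0 + evaluate_term d.2 xy.1 xy.2) ds) := by
      funext a xy
      rw [foldl_add_shift (fun d => evaluate_term d.2 xy.1 xy.2) ds (0 + evaluate_term d.2 xy.1 xy.2)]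
      ring
    rw [h1, h2]

-- ===== VERDICT (by name: the statement is the Claim_ definition above) =====
theorem evaluate_derivatives_spec : Claim_equal_evaluate_derivatives := by
  intro terms x_vals y_vals _
  unfold Spec_evaluate_derivatives evaluate_derivatives evaluate_derivatives_alt
  rw [fold_append_char, B_fold _ _ _ _ (by simp) (by simp),
      zipWith_replicate_map, zipWith_replicate_map]
  simp only [List.nil_append, List.foldl_map, zero_add]
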